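-- pv_equiv track=rewrite | github.com/ZXY39/G3KU-Agent | g3ku/runtime/context/frontdoor_query_rewriter.py | canonicalize_visible_ids
-- ===== SOURCE A (Python) =====
-- from typing import Any
--
-- def _normalized_text(value: Any) -> str:
--     return str(value or "").strip()
--
-- def canonicalize_visible_ids(values: list[str] | tuple[str, ...] | None) -> list[str]:
--     seen: set[str] = set()
--     ordered: list[str] = []
--     for value in list(values or []):
--         normalized = _normalized_text(value)
--         if not normalized or normalized in seen:
--             continue
--         seen.add(normalized)
--         ordered.append(normalized)
--     return sorted(ordered)
-- ===== SOURCE B (Python) =====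
-- def canonicalize_visible_ids(values):
--     normalized = sorted(str(v or "").strip() for v in (values or []))
--     out = []
--     for s in normalized:
--         if s and (not out or out[-1] != s):
--             out.append(s)
--     return out
-- ===== Notes on version B (the rewrite author's own statement) =====
-- stated objective: alternative
-- what changed: Replaces A's hash-set first-occurrence dedup followed by a final sort with a sort-first pipeline: normalize everything, sort, then remove empties and adjacent duplicates in one linear pass.
import Mathlib
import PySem

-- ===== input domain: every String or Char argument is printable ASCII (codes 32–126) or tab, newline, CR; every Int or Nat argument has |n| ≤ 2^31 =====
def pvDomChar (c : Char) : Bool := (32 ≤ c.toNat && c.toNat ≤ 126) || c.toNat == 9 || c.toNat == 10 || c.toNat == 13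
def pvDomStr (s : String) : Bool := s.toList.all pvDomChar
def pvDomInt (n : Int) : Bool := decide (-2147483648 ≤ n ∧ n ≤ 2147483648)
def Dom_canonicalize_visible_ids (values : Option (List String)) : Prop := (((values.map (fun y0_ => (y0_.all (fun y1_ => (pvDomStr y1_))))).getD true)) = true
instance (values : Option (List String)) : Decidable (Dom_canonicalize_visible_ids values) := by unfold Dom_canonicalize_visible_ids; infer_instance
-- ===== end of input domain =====

-- B changes the shape of the computation (sort first, then strip empties and adjacent duplicates in one pass)
-- instead of A's hash-set dedup followed by a final sort; objective: alternative, same asymptotic cost.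

-- ===== PORT A =====
-- str(value or "") on a str argument is "" if value == "" and value otherwise, so
-- _normalized_text(value) = value.strip() exactly; ported as PySem.Str.strip.
def canonicalize_visible_ids (values : Option (List String)) : List String :=
  let st := (values.getD []).foldl
    (fun (st : PySem.Set String × List String) value =>
      let normalized := PySem.Str.strip value
      if normalized = "" ∨ PySem.Set.contains st.1 normalized then st
      else (PySem.Set.add st.1 normalized, st.2 ++ [normalized]))
    (PySem.Set.empty, [])
  PySem.List.sorted st.2 (fun x => x) false

-- ===== PORT B =====
-- out[-1] from Source B is evaluated only under the 'out' (nonempty) guard; ported as out.getLast?.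
def canonicalize_visible_ids_alt (values : Option (List String)) : List String :=
  let normalized := PySem.List.sorted ((values.getD []).map PySem.Str.strip) (fun x => x) false
  normalized.foldl
    (fun (out : List String) s =>
      if s ≠ "" ∧ (out = [] ∨ out.getLast? ≠ some s) then out ++ [s] else out)
    []

-- ===== PRECONDITION & SPEC =====
def Spec_canonicalize_visible_ids (values : Option (List String)) (out : List String) : Prop := out = canonicalize_visible_ids_alt values
instance (values : Option (List String)) (out : List String) : Decidable (Spec_canonicalize_visible_ids values out) := by unfold Spec_canonicalize_visible_ids; infer_instance

-- ===== CLAIM (what is proved, stated in full; the proofs are below) =====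
def Claim_equal_canonicalize_visible_ids : Prop := ∀ (values : Option (List String)), Dom_canonicalize_visible_ids values → Spec_canonicalize_visible_ids values (canonicalize_visible_ids values)

-- ===== LEMMAS AND PROOFS =====

-- A's loop keeps seen and ordered equal as lists, and both are Set.add folded over the
-- nonempty stripped values.
lemma aFold_eq (l : List String) (s : List String) :
    l.foldl
      (fun (st : PySem.Set String × List String) value =>
        let normalized := PySem.Str.strip value
        if normalized = "" ∨ PySem.Set.contains st.1 normalized then st
        else (PySem.Set.add st.1 normalized, st.2 ++ [normalized]))
      (s, s)
    = (((l.map PySem.Str.strip).filter (fun n => n ≠ "")).foldl PySem.Set.add s,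
       ((l.map PySem.Str.strip).filter (fun n => n ≠ "")).foldl PySem.Set.add s) := by
  induction l generalizing s with
  | nil => simp
  | cons v t ih =>
    rw [List.foldl_cons, List.map_cons, List.filter_cons]
    by_cases h1 : PySem.Str.strip v = ""
    · simp [PySem.Set.add, h1]
      simp [PySem.Set.add] at ih
      exact ih s
    · by_cases h2 : PySem.Str.strip v ∈ s
      · simp [PySem.Set.add, h1, h2]
        simp [PySem.Set.add] at ih
        exact ih s
      · simp [PySem.Set.add, h1, h2]
        simp [PySem.Set.add] at ih
        exact ih (s ++ [PySem.Str.strip v])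

-- in a strictly increasing list whose elements are all ≤ b, b can only sit at the end
lemma mem_strict_last {acc : List String} {b : String}
    (hs : acc.Pairwise (· < ·)) (hle : ∀ a ∈ acc, a ≤ b) (hb : b ∈ acc) :
    acc.getLast? = some b := by
  induction acc with
  | nil => cases hb
  | cons a t ih =>
    cases t with
    | nil =>
      simp at hb; simp [hb]
    | cons c u =>
      rw [List.getLast?_cons_cons]
      rcases List.mem_cons.mp hb with hba | hbt
      · exfalso
        have hac : a < c := (List.pairwise_cons.mp hs).1 c (by simp)
        have hcb : c ≤ b := hle c (by simp)
        have : a < b := lt_of_lt_of_le hac hcb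
        exact absurd hba (by intro h; subst h; exact lt_irrefl b this)
      · exact ih (List.pairwise_cons.mp hs).2 (fun x hx => hle x (List.mem_cons_of_mem a hx)) hbt

-- invariant of B's adjacent-dedup pass over a (≤)-sorted list
lemma bFold_spec (l : List String) (acc : List String)
    (hl : l.Pairwise (· ≤ ·)) (hacc : acc.Pairwise (· < ·))
    (hle : ∀ a ∈ acc, ∀ b ∈ l, a ≤ b) :
    (l.foldl
      (fun (out : List String) s =>
        if s ≠ "" ∧ (out = [] ∨ out.getLast? ≠ some s) then out ++ [s] else out) acc).Pairwise (· < ·)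
    ∧ ∀ x, (x ∈ l.foldl
      (fun (out : List String) s =>
        if s ≠ "" ∧ (out = [] ∨ out.getLast? ≠ some s) then out ++ [s] else out) acc
        ↔ x ∈ acc ∨ (x ∈ l ∧ x ≠ "")) := by
  induction l generalizing acc with
  | nil => simpa using hacc
  | cons b t ih =>
    have hlt : t.Pairwise (· ≤ ·) := (List.pairwise_cons.mp hl).2
    have hbt : ∀ c ∈ t, b ≤ c := (List.pairwise_cons.mp hl).1
    simp only [List.foldl_cons]
    by_cases hc : b ≠ "" ∧ (acc = [] ∨ acc.getLast? ≠ some b)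
    · rw [if_pos hc]
      have hltb : ∀ a ∈ acc, a < b := by
        intro a ha
        have hle' : a ≤ b := hle a ha b (by simp)
        rcases lt_or_eq_of_le hle' with h | h
        · exact h
        · exfalso
          subst h
          have hlast := mem_strict_last hacc (fun x hx => hle x hx a (by simp)) ha
          rcases hc.2 with hnil | hne
          · subst hnil; cases ha
          · exact hne hlast
      have hacc' : (acc ++ [b]).Pairwise (· < ·) := by
        rw [List.pairwise_append]
        exact ⟨hacc, by simp, by simpa using hltb⟩
      have hle' : ∀ a ∈ acc ++ [b], ∀ c ∈ t, a ≤ c := by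
        intro a ha c hcmem
        rcases List.mem_append.mp ha with h | h
        · exact hle a h c (List.mem_cons_of_mem b hcmem)
        · simp at h; subst h; exact hbt c hcmem
      obtain ⟨hp, hm⟩ := ih (acc ++ [b]) hlt hacc' hle'
      refine ⟨hp, fun x => ?_⟩
      rw [hm x]
      constructor
      · rintro (hx | ⟨hx, hxe⟩)
        · rcases List.mem_append.mp hx with h | h
          · exact Or.inl h
          · simp at h; subst h; exact Or.inr ⟨by simp, hc.1⟩
        · exact Or.inr ⟨List.mem_cons_of_mem b hx, hxe⟩
      · rintro (hx | ⟨hx, hxe⟩)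
        · exact Or.inl (List.mem_append.mpr (Or.inl hx))
        · rcases List.mem_cons.mp hx with h | h
          · subst h; exact Or.inl (by simp)
          · exact Or.inr ⟨h, hxe⟩
    · rw [if_neg hc]
      have hle' : ∀ a ∈ acc, ∀ c ∈ t, a ≤ c :=
        fun a ha c hcmem => hle a ha c (List.mem_cons_of_mem b hcmem)
      obtain ⟨hp, hm⟩ := ih acc hlt hacc hle'
      refine ⟨hp, fun x => ?_⟩
      rw [hm x]
      constructor
      · rintro (hx | ⟨hx, hxe⟩)
        · exact Or.inl hx
        · exact Or.inr ⟨List.mem_cons_of_mem b hx, hxe⟩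
      · rintro (hx | ⟨hx, hxe⟩)
        · exact Or.inl hx
        · rcases List.mem_cons.mp hx with h | h
          · subst h
            have hlast : acc.getLast? = some x := by tauto
            left
            have := List.getLast?_eq_some_iff.mp hlast
            obtain ⟨ys, hys⟩ := this
            rw [hys]; simp
          · exact Or.inr ⟨h, hxe⟩

-- two strictly increasing string lists with the same members are equal
lemma strict_sorted_ext {l1 l2 : List String}
    (h1 : l1.Pairwise (· < ·)) (h2 : l2.Pairwise (· < ·))
    (h : ∀ x, x ∈ l1 ↔ x ∈ l2) : l1 = l2 := by
  induction l1 generalizing l2 with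
  | nil =>
    cases l2 with
    | nil => rfl
    | cons b t => exact absurd ((h b).mpr (by simp)) (by simp)
  | cons a t1 ih =>
    cases l2 with
    | nil => exact absurd ((h a).mp (by simp)) (by simp)
    | cons b t2 =>
      have hp1 : ∀ x ∈ t1, a < x := (List.pairwise_cons.mp h1).1
      have hp2 : ∀ x ∈ t2, b < x := (List.pairwise_cons.mp h2).1
      have hab : a = b := by
        rcases List.mem_cons.mp ((h a).mp (by simp)) with hx | hx
        · exact hx
        · rcases List.mem_cons.mp ((h b).mpr (by simp)) with hy | hy
          · exact hy.symm
          · exact absurd (lt_trans (hp1 b hy) (hp2 a hx)) (lt_irrefl a)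
      subst hab
      have ht : ∀ x, x ∈ t1 ↔ x ∈ t2 := by
        intro x
        constructor
        · intro hx
          rcases List.mem_cons.mp ((h x).mp (List.mem_cons_of_mem a hx)) with h' | h'
          · exact absurd h' (ne_of_gt (hp1 x hx))
          · exact h'
        · intro hx
          rcases List.mem_cons.mp ((h x).mpr (List.mem_cons_of_mem a hx)) with h' | h'
          · exact absurd h' (ne_of_gt (hp2 x hx))
          · exact h'
      rw [ih (List.pairwise_cons.mp h1).2 (List.pairwise_cons.mp h2).2 ht]

-- ===== VERDICT (by name: the statement is the Claim_ definition above) =====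
theorem canonicalize_visible_ids_spec : Claim_equal_canonicalize_visible_ids := by
  intro values _
  show canonicalize_visible_ids values = canonicalize_visible_ids_alt values
  have hempty : (PySem.Set.empty : PySem.Set String) = ([] : List String) := rfl
  have hAeq : canonicalize_visible_ids values
      = PySem.List.sorted
          (PySem.Set.ofList (((values.getD []).map PySem.Str.strip).filter (fun n => n ≠ "")))
          (fun x => x) false := by
    simp only [canonicalize_visible_ids]
    rw [hempty, aFold_eq, PySem.Set.ofList_eq_foldl]
  have hsort : (PySem.List.sorted ((values.getD []).map PySem.Str.strip) (fun x => x) false).Pairwise (· ≤ ·) :=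
    PySem.List.sorted_pairwise _ _
  obtain ⟨hBpw, hBmem⟩ := bFold_spec
    (PySem.List.sorted ((values.getD []).map PySem.Str.strip) (fun x => x) false) []
    hsort (by simp) (by simp)
  have hBeq : canonicalize_visible_ids_alt values
      = (PySem.List.sorted ((values.getD []).map PySem.Str.strip) (fun x => x) false).foldl
          (fun out s => if s ≠ "" ∧ (out = [] ∨ out.getLast? ≠ some s) then out ++ [s] else out) [] := by
    simp only [canonicalize_visible_ids_alt]
  rw [hAeq, hBeq]
  apply strict_sorted_ext (PySem.List.sorted_ofList_pairwise_lt _) hBpw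
  intro x
  rw [PySem.List.mem_sorted, PySem.Set.mem_ofList, List.mem_filter, hBmem x]
  simp [PySem.List.mem_sorted]
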